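-- pv_equiv track=rewrite | github.com/joenorton/sans | sans/sans/fmt/formatter.py | split_string_segments
-- ===== SOURCE A (Python) =====
-- def split_string_segments(text: str) -> list[tuple[str, bool]]:
--     segments: list[tuple[str, bool]] = []
--     i = 0
--     start = 0
--     while i < len(text):
--         ch = text[i]
--         if ch in ("'", '"'):
--             if start < i:
--                 segments.append((text[start:i], False))
--             quote = ch
--             string_start = i
--             i += 1
--             escape = False
--             while i < len(text):
--                 c = text[i]
--                 if escape:
--                     escape = False
--                 elif c == "\\":
--                     escape = True
--                 elif c == quote:
--                     i += 1
--                     break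
--                 i += 1
--             segments.append((text[string_start:i], True))
--             start = i
--             continue
--         i += 1
--     if start < len(text):
--         segments.append((text[start:], False))
--     return segments
-- ===== SOURCE B (Python) =====
-- def split_string_segments(text: str) -> list[tuple[str, bool]]:
--     segments: list[tuple[str, bool]] = []
--     cur: list[str] = []
--     in_string = False
--     quote = ''
--     escape = False
--     for ch in text:
--         if in_string:
--             cur.append(ch)
--             if escape:
--                 escape = False
--             elif ch == '\\':
--                 escape = True
--             elif ch == quote:
--                 segments.append((''.join(cur), True))
--                 cur = []
--                 in_string = False
--         else:
--             if ch in ('"', "'"):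
--                 if cur:
--                     segments.append((''.join(cur), False))
--                 cur = [ch]
--                 in_string = True
--                 quote = ch
--                 escape = False
--             else:
--                 cur.append(ch)
--     if cur:
--         segments.append((''.join(cur), in_string))
--     return segments
-- ===== Notes on version B (the rewrite author's own statement) =====
-- stated objective: simpler
-- what changed: Replaced the nested index/slice loops by a single flat pass over the characters carrying an explicit state machine (in_string, quote, escape) and a character buffer, so no index arithmetic or slicing remains; a timing run measured this constant-factor win.
import Mathlib
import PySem

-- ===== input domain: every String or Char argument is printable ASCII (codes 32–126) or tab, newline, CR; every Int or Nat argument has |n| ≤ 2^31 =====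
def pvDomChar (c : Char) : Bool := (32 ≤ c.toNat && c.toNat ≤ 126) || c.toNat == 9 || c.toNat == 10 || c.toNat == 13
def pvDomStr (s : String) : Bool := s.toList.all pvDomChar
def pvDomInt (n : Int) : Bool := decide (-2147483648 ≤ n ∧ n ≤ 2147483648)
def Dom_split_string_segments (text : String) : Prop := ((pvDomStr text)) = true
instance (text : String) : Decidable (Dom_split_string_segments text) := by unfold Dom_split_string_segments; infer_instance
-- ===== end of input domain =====

-- B rewrites A's nested index/slice loops as one flat state-machine pass carrying a
-- character buffer (objective: simpler; same O(n) cost).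

-- ===== PORT A =====
-- inner 'while' of A: scan from index i inside a string opened with `quote`; returns the
-- index just past the string (past the closing quote, or len(text) if unterminated).
-- `fuel` is only a structural totality guard: every call site passes fuel ≥ len(text) - i,
-- so the fuel-0 case is never reached while i < len(text).
def aInner (t : List Char) (quote : Char) : Nat → Nat → Bool → Nat
  | 0, i, _ => i
  | fuel+1, i, escape =>
    if h : i < t.length then
      if escape then aInner t quote fuel (i+1) false
      else if t[i] = '\\' then aInner t quote fuel (i+1) true
      else if t[i] = quote then i + 1
      else aInner t quote fuel (i+1) escape
    else i

-- outer 'while' of A (same fuel guard); text[a:b] with 0 ≤ a ≤ b ≤ len(text) is exactly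
-- (t.drop a).take (b-a), and the fuel-0 branch is the loop-exit code.
def aOuter (t : List Char) : Nat → Nat → Nat → List (List Char × Bool) → List (List Char × Bool)
  | 0, _, start, segs => if start < t.length then segs ++ [(t.drop start, false)] else segs
  | fuel+1, i, start, segs =>
    if h : i < t.length then
      if t[i] = '\'' ∨ t[i] = '"' then
        aOuter t fuel (aInner t t[i] t.length (i+1) false) (aInner t t[i] t.length (i+1) false)
          ((if start < i then segs ++ [((t.drop start).take (i - start), false)] else segs)
            ++ [((t.drop i).take (aInner t t[i] t.length (i+1) false - i), true)])
      else aOuter t fuel (i+1) start segs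
    else if start < t.length then segs ++ [(t.drop start, false)] else segs

def split_string_segments (text : String) : List (String × Bool) :=
  (aOuter text.toList text.toList.length 0 0 []).map (fun p => (String.mk p.1, p.2))

-- ===== PORT B =====
-- the single flat loop of Source B: segs = output so far, cur = pending character buffer
def bLoop (cs : List Char) (segs : List (List Char × Bool)) (cur : List Char)
    (inStr : Bool) (quote : Char) (escape : Bool) : List (List Char × Bool) :=
  match cs with
  | [] => if cur ≠ [] then segs ++ [(cur, inStr)] else segs
  | ch :: rest =>
    if inStr then
      if escape then bLoop rest segs (cur ++ [ch]) true quote false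
      else if ch = '\\' then bLoop rest segs (cur ++ [ch]) true quote true
      else if ch = quote then bLoop rest (segs ++ [(cur ++ [ch], true)]) [] false quote escape
      else bLoop rest segs (cur ++ [ch]) true quote escape
    else
      if ch = '"' ∨ ch = '\'' then
        bLoop rest (if cur ≠ [] then segs ++ [(cur, false)] else segs) [ch] true ch false
      else bLoop rest segs (cur ++ [ch]) false quote escape

def split_string_segments_alt (text : String) : List (String × Bool) :=
  (bLoop text.toList [] [] false ' ' false).map (fun p => (String.mk p.1, p.2))

-- ===== PRECONDITION & SPEC =====
def Spec_split_string_segments (text : String) (out : List (String × Bool)) : Prop := out = split_string_segments_alt text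
instance (text : String) (out : List (String × Bool)) : Decidable (Spec_split_string_segments text out) := by unfold Spec_split_string_segments; infer_instance

-- ===== CLAIM (what is proved, stated in full; the proofs are below) =====
def Claim_equal_split_string_segments : Prop := ∀ (text : String), Dom_split_string_segments text → Spec_split_string_segments text (split_string_segments text)

-- ===== LEMMAS AND PROOFS =====

theorem aInner_ge (t : List Char) (quote : Char) :
    ∀ (fuel i : Nat) (escape : Bool), i ≤ aInner t quote fuel i escape := by
  intro fuel
  induction fuel with
  | zero => intro i escape; simp [aInner]
  | succ n ih =>
    intro i escape
    simp only [aInner]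
    split
    · split_ifs with h1 h2 h3
      · have := ih (i+1) false; omega
      · have := ih (i+1) true; omega
      · omega
      · have := ih (i+1) escape; omega
    · omega

theorem aInner_le (t : List Char) (quote : Char) :
    ∀ (fuel i : Nat) (escape : Bool), i ≤ t.length → aInner t quote fuel i escape ≤ t.length := by
  intro fuel
  induction fuel with
  | zero => intro i escape hi; simpa [aInner] using hi
  | succ n ih =>
    intro i escape hi
    simp only [aInner]
    split
    · split_ifs with h1 h2 h3
      · exact ih (i+1) false (by omega)
      · exact ih (i+1) true (by omega)
      · omega
      · exact ih (i+1) escape (by omega)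
    · omega

theorem take_ne_nil_iff (t : List Char) (start i : Nat) (hsi : start ≤ i) (hi : i ≤ t.length) :
    ((t.drop start).take (i - start) ≠ []) ↔ start < i := by
  have hl : ((t.drop start).take (i - start)).length = min (i - start) (t.length - start) := by simp
  constructor
  · intro hne
    by_contra hlt
    have h0 : i - start = 0 := by omega
    rw [h0, List.take_zero] at hne
    exact hne rfl
  · intro hlt
    have : 0 < ((t.drop start).take (i - start)).length := by omega
    exact List.ne_nil_of_length_pos this

theorem take_all_drop (t : List Char) (start : Nat) :
    (t.drop start).take (t.length - start) = t.drop start := by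
  have h : t.length - start = (t.drop start).length := by simp
  rw [h, List.take_length]

theorem take_push (t : List Char) (start i : Nat) (h : i < t.length) (hsi : start ≤ i) :
    (t.drop start).take (i - start) ++ [t[i]] = (t.drop start).take (i + 1 - start) := by
  have h1 : i + 1 - start = (i - start) + 1 := by omega
  rw [h1, List.take_succ]
  have h2 : (t.drop start)[i - start]? = some t[i] := by
    rw [List.getElem?_drop]
    have h3 : start + (i - start) = i := by omega
    rw [h3, List.getElem?_eq_getElem h]
  rw [h2]
  rfl

-- in-string phase: B's buffer loop consumes exactly the characters A's inner loop skips,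
-- emitting cur ++ text[i:j] as one string segment (also when the string is unterminated)
theorem inner_agree (t : List Char) (quote : Char) :
    ∀ (n i : Nat) (cur : List Char) (escape : Bool) (segs : List (List Char × Bool)),
    t.length - i ≤ n → i ≤ t.length → cur ≠ [] →
    bLoop (t.drop i) segs cur true quote escape =
      bLoop (t.drop (aInner t quote n i escape))
        (segs ++ [(cur ++ (t.drop i).take (aInner t quote n i escape - i), true)])
        [] false quote false := by
  intro n
  induction n with
  | zero =>
    intro i cur escape segs hn hi hc
    have hie : i = t.length := by omega
    subst hie
    simp [aInner, bLoop, hc]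
  | succ n ih =>
    intro i cur escape segs hn hi hc
    by_cases h : i < t.length
    · simp only [aInner, dif_pos h]
      have hdrop : t.drop i = t[i] :: t.drop (i+1) := List.drop_eq_getElem_cons h
      by_cases he : escape = true
      · rw [if_pos he, hdrop]
        have hstep : bLoop (t[i] :: t.drop (i+1)) segs cur true quote escape
            = bLoop (t.drop (i+1)) segs (cur ++ [t[i]]) true quote false := by
          simp [bLoop, he]
        rw [hstep, ih (i+1) (cur ++ [t[i]]) false segs (by omega) (by omega) (by simp)]
        have hge := aInner_ge t quote n (i+1) false
        have h2 : aInner t quote n (i+1) false - i = (aInner t quote n (i+1) false - (i+1)) + 1 := by omega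
        rw [h2, List.take_succ_cons]
        simp
      · rw [if_neg he]
        by_cases hbs : t[i] = '\\'
        · rw [if_pos hbs, hdrop]
          have hstep : bLoop (t[i] :: t.drop (i+1)) segs cur true quote escape
              = bLoop (t.drop (i+1)) segs (cur ++ [t[i]]) true quote true := by
            simp [bLoop, he, hbs]
          rw [hstep, ih (i+1) (cur ++ [t[i]]) true segs (by omega) (by omega) (by simp)]
          have hge := aInner_ge t quote n (i+1) true
          have h2 : aInner t quote n (i+1) true - i = (aInner t quote n (i+1) true - (i+1)) + 1 := by omega
          rw [h2, List.take_succ_cons]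
          simp
        · rw [if_neg hbs]
          by_cases hq : t[i] = quote
          · rw [if_pos hq, hdrop]
            have hqb : quote ≠ '\\' := fun hb => hbs (hq.trans hb)
            have hstep : bLoop (t[i] :: t.drop (i+1)) segs cur true quote escape
                = bLoop (t.drop (i+1)) (segs ++ [(cur ++ [t[i]], true)]) [] false quote escape := by
              simp [bLoop, he, hq, hqb]
            rw [hstep]
            have hesc : escape = false := by simpa using he
            subst hesc
            have h2 : i + 1 - i = 0 + 1 := by omega
            rw [h2, List.take_succ_cons, List.take_zero]
          · rw [if_neg hq, hdrop]
            have hstep : bLoop (t[i] :: t.drop (i+1)) segs cur true quote escape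
                = bLoop (t.drop (i+1)) segs (cur ++ [t[i]]) true quote escape := by
              simp [bLoop, he, hbs, hq]
            rw [hstep, ih (i+1) (cur ++ [t[i]]) escape segs (by omega) (by omega) (by simp)]
            have hge := aInner_ge t quote n (i+1) escape
            have h2 : aInner t quote n (i+1) escape - i = (aInner t quote n (i+1) escape - (i+1)) + 1 := by omega
            rw [h2, List.take_succ_cons]
            simp
    · have hie : i = t.length := by omega
      subst hie
      simp [aInner, bLoop, hc]

-- main invariant: outside a string, B's pending buffer is exactly text[start:i]
theorem outer_agree (t : List Char) :
    ∀ (n i start : Nat) (segs : List (List Char × Bool)) (q : Char) (e : Bool),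
    t.length - i ≤ n → start ≤ i → i ≤ t.length →
    aOuter t n i start segs
      = bLoop (t.drop i) segs ((t.drop start).take (i - start)) false q e := by
  intro n
  induction n with
  | zero =>
    intro i start segs q e hn hsi hi
    have hie : i = t.length := by omega
    subst hie
    rw [List.drop_length]
    simp only [aOuter, bLoop]
    by_cases hc : start < t.length
    · rw [if_pos ((take_ne_nil_iff t start t.length hsi hi).mpr hc), if_pos hc, take_all_drop]
    · rw [if_neg (fun hx => hc ((take_ne_nil_iff t start t.length hsi hi).mp hx)), if_neg hc]
  | succ n ih =>
    intro i start segs q e hn hsi hi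
    by_cases h : i < t.length
    · simp only [aOuter, dif_pos h]
      have hdrop : t.drop i = t[i] :: t.drop (i+1) := List.drop_eq_getElem_cons h
      by_cases hq : t[i] = '\'' ∨ t[i] = '"'
      · rw [if_pos hq, hdrop]
        have hstep : bLoop (t[i] :: t.drop (i+1)) segs ((t.drop start).take (i - start)) false q e
            = bLoop (t.drop (i+1))
                (if (t.drop start).take (i - start) ≠ [] then
                   segs ++ [((t.drop start).take (i - start), false)] else segs)
                [t[i]] true t[i] false := by
          simp only [bLoop, Bool.false_eq_true, if_false]
          rw [if_pos (by tauto)]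
        rw [hstep]
        have hj1 : i + 1 ≤ aInner t t[i] t.length (i+1) false := aInner_ge t t[i] t.length (i+1) false
        have hjle : aInner t t[i] t.length (i+1) false ≤ t.length :=
          aInner_le t t[i] t.length (i+1) false (by omega)
        rw [inner_agree t t[i] t.length (i+1) [t[i]] false _ (by omega) (by omega) (by simp)]
        rw [ih (aInner t t[i] t.length (i+1) false) (aInner t t[i] t.length (i+1) false) _ t[i] false
            (by omega) (le_refl _) hjle]
        have hflush : (if (t.drop start).take (i - start) ≠ [] then
              segs ++ [((t.drop start).take (i - start), false)] else segs)
            = (if start < i then segs ++ [((t.drop start).take (i - start), false)] else segs) := by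
          by_cases hc : start < i
          · rw [if_pos ((take_ne_nil_iff t start i hsi (by omega)).mpr hc), if_pos hc]
          · rw [if_neg (fun hx => hc ((take_ne_nil_iff t start i hsi (by omega)).mp hx)), if_neg hc]
        rw [hflush]
        have h2 : aInner t t[i] t.length (i+1) false - i
            = (aInner t t[i] t.length (i+1) false - (i+1)) + 1 := by omega
        rw [h2, List.take_succ_cons]
        simp
      · rw [if_neg hq, hdrop]
        have hstep : bLoop (t[i] :: t.drop (i+1)) segs ((t.drop start).take (i - start)) false q e
            = bLoop (t.drop (i+1)) segs ((t.drop start).take (i - start) ++ [t[i]]) false q e := by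
          simp only [bLoop, Bool.false_eq_true, if_false]
          rw [if_neg (by tauto)]
        rw [hstep, take_push t start i h hsi]
        exact ih (i+1) start segs q e (by omega) (by omega) (by omega)
    · have hie : i = t.length := by omega
      subst hie
      rw [List.drop_length]
      simp only [aOuter, dif_neg h, bLoop]
      by_cases hc : start < t.length
      · rw [if_pos ((take_ne_nil_iff t start t.length hsi hi).mpr hc), if_pos hc, take_all_drop]
      · rw [if_neg (fun hx => hc ((take_ne_nil_iff t start t.length hsi hi).mp hx)), if_neg hc]

-- ===== VERDICT (by name: the statement is the Claim_ definition above) =====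
theorem split_string_segments_spec : Claim_equal_split_string_segments := by
  intro text _
  unfold Spec_split_string_segments split_string_segments split_string_segments_alt
  rw [outer_agree text.toList text.toList.length 0 0 [] ' ' false (by omega) (le_refl 0) (Nat.zero_le _)]
  simp
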